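-- pv_equiv track=rewrite | github.com/arspaper/temp25_05 | 19_20_21.py | func1_1
-- ===== SOURCE A (Python) =====
-- def func1_1(a, s, p):  # 2 piles, +1, *2, >= 59, vanya first win, bad case petya, min s
--     if p == 3:
--         if a + s >= 59:
--             return True
--         else:
--             return False
--     return func1_1(a + 1, s, p + 1) or func1_1(a, s + 1, p + 1)\
--         or func1_1(a * 2, s, p + 1) or func1_1(a, s * 2, p + 1)
-- ===== SOURCE B (Python) =====
-- def func1_1(a, s, p):
--     # Explicit-stack iterative DFS with early exit, instead of A's recursion.
--     stack = [(3 - p, a, s)]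
--     while stack:
--         n, x, y = stack.pop()
--         if n <= 0:
--             if x + y >= 59:
--                 return True
--         else:
--             stack.append((n - 1, x, y * 2))
--             stack.append((n - 1, x * 2, y))
--             stack.append((n - 1, x, y + 1))
--             stack.append((n - 1, x + 1, y))
--     return False
-- ===== Notes on version B (the rewrite author's own statement) =====
-- stated objective: alternative
-- what changed: Replaces A's fourfold recursive calls joined by 'or' with an iterative depth-first search driven by an explicit stack of (remaining-moves, a, s) states, returning True on the first winning leaf.
import Mathlib
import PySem

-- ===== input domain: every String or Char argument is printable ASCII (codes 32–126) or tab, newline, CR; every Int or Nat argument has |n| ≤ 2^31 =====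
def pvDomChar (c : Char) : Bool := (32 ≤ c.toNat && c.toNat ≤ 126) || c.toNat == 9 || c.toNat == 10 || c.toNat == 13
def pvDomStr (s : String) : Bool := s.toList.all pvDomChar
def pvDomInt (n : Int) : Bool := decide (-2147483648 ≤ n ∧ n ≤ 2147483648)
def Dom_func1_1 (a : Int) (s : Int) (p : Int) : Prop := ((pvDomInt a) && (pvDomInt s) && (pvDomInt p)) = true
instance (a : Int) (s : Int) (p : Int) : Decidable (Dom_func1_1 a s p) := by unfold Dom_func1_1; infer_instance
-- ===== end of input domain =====

-- B replaces A's recursion by an explicit-stack iterative DFS over (remaining-moves, a, s)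
-- states with early exit; same cost, different decomposition.

-- ===== PORT A =====
-- A recurses with p+1 until p == 3; the remaining depth is (3-p).toNat, used as the
-- structural recursion measure (for p > 3 the Python raises RecursionError; excluded by Pre_).
def func1_1_go (n : Nat) (a : Int) (s : Int) : Bool :=
  match n with
  | 0 => decide (a + s ≥ 59)
  | Nat.succ m =>
      func1_1_go m (a + 1) s || func1_1_go m a (s + 1)
        || func1_1_go m (a * 2) s || func1_1_go m a (s * 2)

def func1_1 (a : Int) (s : Int) (p : Int) : Bool :=
  func1_1_go (3 - p).toNat a s

-- ===== PORT B =====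
-- explicit-stack DFS: pop a state, test leaves, push the four successors (head = top of stack)
def func1_1_dfs (stack : List (Nat × Int × Int)) : Bool :=
  match stack with
  | [] => false
  | (0, x, y) :: rest => if x + y ≥ 59 then true else func1_1_dfs rest
  | (Nat.succ m, x, y) :: rest =>
      func1_1_dfs ((m, x + 1, y) :: (m, x, y + 1) :: (m, x * 2, y) :: (m, x, y * 2) :: rest)
termination_by (stack.map (fun t => 5 ^ t.1)).sum
decreasing_by
  · simp
  · simp only [List.map_cons, List.sum_cons]
    have h : 0 < 5 ^ m := Nat.pow_pos (by norm_num)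
    omega

def func1_1_alt (a : Int) (s : Int) (p : Int) : Bool :=
  func1_1_dfs [((3 - p).toNat, a, s)]

-- ===== PRECONDITION & SPEC =====
-- Pre_: for p > 3 the Python A never reaches its base case and raises RecursionError.
def Pre_func1_1 (_a : Int) (_s : Int) (p : Int) : Prop := p ≤ 3
instance (a : Int) (s : Int) (p : Int) : Decidable (Pre_func1_1 a s p) := by
  unfold Pre_func1_1; infer_instance

def pvWitness_func1_1 : Int × Int × Int := (30, 20, 1)

def Spec_func1_1 (a : Int) (s : Int) (p : Int) (out : Bool) : Prop := out = func1_1_alt a s p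
instance (a : Int) (s : Int) (p : Int) (out : Bool) : Decidable (Spec_func1_1 a s p out) := by
  unfold Spec_func1_1; infer_instance

-- ===== CLAIM (what is proved, stated in full; the proofs are below) =====
def Claim_equal_func1_1 : Prop := ∀ (a : Int) (s : Int) (p : Int), Dom_func1_1 a s p → Pre_func1_1 a s p → Spec_func1_1 a s p (func1_1 a s p)

-- ===== LEMMAS AND PROOFS =====

lemma dfs_any (stack : List (Nat × Int × Int)) :
    func1_1_dfs stack = stack.any (fun t => func1_1_go t.1 t.2.1 t.2.2) := by
  induction stack using func1_1_dfs.induct with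
  | case1 => simp [func1_1_dfs]
  | case2 x y rest h => simp [func1_1_dfs, func1_1_go, h]
  | case3 x y rest h ih => simp [func1_1_dfs, func1_1_go, h, ih]
  | case4 m x y rest ih =>
      rw [func1_1_dfs, ih]
      simp [func1_1_go, Bool.or_assoc]

-- ===== VERDICT (by name: the statement is the Claim_ definition above) =====
theorem func1_1_spec : Claim_equal_func1_1 := by
  intro a s p _ _
  unfold Spec_func1_1 func1_1 func1_1_alt
  rw [dfs_any]
  simp
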